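-- pv_equiv track=rewrite | github.com/gshirato/streamlit-video-analysis | src/streamlit_video_analysis/app/video.py | create_hierarchical_structure
-- ===== SOURCE A (Python) =====
-- def create_hierarchical_structure(input_dict):
--     # Initialize the root structure
--     root = {}
--
--     for key, value in input_dict.items():
--         parts = key.split("/")
--
--         if len(parts) == 4:
--             byType, id, play_name, team = parts
--
--             # Ensure the structure exists step by step
--             if byType not in root:
--                 root[byType] = {}
--             if id not in root[byType]:
--                 root[byType][id] = {}
--             if play_name not in root[byType][id]:
--                 root[byType][id][play_name] = {}
--
--             # Assign the value to the deepest level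
--             root[byType][id][play_name][team] = value
--
--     return root
-- ===== SOURCE B (Python) =====
-- def create_hierarchical_structure(input_dict):
--     # Collect the (parts, value) records with exactly 4 path components,
--     # then build the nested dict by recursive grouping per level.
--     records = []
--     for key, value in input_dict.items():
--         parts = key.split("/")
--         if len(parts) == 4:
--             records.append((parts, value))
--     return _build(records, 0)
--
--
-- def _build(items, depth):
--     if depth == 3:
--         return {parts[3]: value for parts, value in items}
--     groups = {}
--     for parts, value in items:
--         groups.setdefault(parts[depth], []).append((parts, value))
--     return {head: _build(group, depth + 1) for head, group in groups.items()}
-- ===== Notes on version B (the rewrite author's own statement) =====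
-- stated objective: alternative
-- what changed: A builds the nested dict incrementally per entry with three unrolled existence checks and in-place assignment; B first collects the 4-part records and then constructs the tree recursively, grouping the records level by level.
import Mathlib
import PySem

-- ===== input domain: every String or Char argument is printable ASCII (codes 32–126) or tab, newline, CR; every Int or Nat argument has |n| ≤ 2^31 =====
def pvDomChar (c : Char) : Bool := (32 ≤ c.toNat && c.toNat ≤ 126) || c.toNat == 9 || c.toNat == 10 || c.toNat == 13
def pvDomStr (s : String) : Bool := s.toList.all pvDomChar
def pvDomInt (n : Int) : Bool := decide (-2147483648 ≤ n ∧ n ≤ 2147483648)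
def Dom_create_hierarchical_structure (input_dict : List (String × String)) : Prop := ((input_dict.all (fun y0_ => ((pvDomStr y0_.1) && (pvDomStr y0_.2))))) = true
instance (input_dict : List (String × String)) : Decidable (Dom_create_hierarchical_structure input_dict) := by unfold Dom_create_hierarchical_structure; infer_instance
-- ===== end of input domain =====

-- B replaces A's incremental per-entry nested-dict mutation by a recursive group-by-level
-- construction (alternative decomposition, same asymptotic cost); the equivalence is about
-- the return value (neither implementation mutates its argument).

abbrev pvD3 := PySem.Dict String String
abbrev pvD2 := PySem.Dict String pvD3
abbrev pvD1 := PySem.Dict String pvD2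
abbrev pvD0 := PySem.Dict String pvD1
abbrev pvQuad := ((String × String × String × String) × String)

-- shared output convention: a Python nested dict is returned as nested item lists
def pvUnwrap (d : pvD0) : List (String × List (String × List (String × List (String × String)))) :=
  d.items.map (fun q => (q.1, q.2.items.map (fun r =>
    (r.1, r.2.items.map (fun s => (s.1, s.2.items))))))

-- ===== PORT A =====
-- the body of A's loop after unpacking: ensure each level exists, then assign at the
-- deepest level (each Python subscript chain re-reads the current dict, as here)
def pvAssign (root : pvD0) (b i p t v : String) : pvD0 :=
  let root := if root.contains b then root else root.insert b PySem.Dict.empty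
  let root := if (root.getD b PySem.Dict.empty).contains i then root
              else root.insert b ((root.getD b PySem.Dict.empty).insert i PySem.Dict.empty)
  let root := if ((root.getD b PySem.Dict.empty).getD i PySem.Dict.empty).contains p then root
              else root.insert b ((root.getD b PySem.Dict.empty).insert i
                    (((root.getD b PySem.Dict.empty).getD i PySem.Dict.empty).insert p PySem.Dict.empty))
  root.insert b ((root.getD b PySem.Dict.empty).insert i
    (((root.getD b PySem.Dict.empty).getD i PySem.Dict.empty).insert p
      ((((root.getD b PySem.Dict.empty).getD i PySem.Dict.empty).getD p PySem.Dict.empty).insert t v)))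

def pvStepA (root : pvD0) (kv : String × String) : pvD0 :=
  match PySem.Str.split? kv.1 "/" with
  | some [b, i, p, t] => pvAssign root b i p t kv.2
  | _ => root

def create_hierarchical_structure (input_dict : List (String × String)) : List (String × List (String × List (String × List (String × String)))) :=
  pvUnwrap (input_dict.foldl pvStepA PySem.Dict.empty)

-- ===== PORT B =====
-- B first collects the records whose key has exactly 4 parts …
def pvQuadsB (input_dict : List (String × String)) : List pvQuad :=
  input_dict.foldl (fun acc kv =>
    match PySem.Str.split? kv.1 "/" with
    | some [b, i, p, t] => acc ++ [((b, i, p, t), kv.2)]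
    | _ => acc) []

-- … then builds each level by grouping the records on that level's component
-- (B's Python `_build(items, depth)` is depth-indexed; the Lean types force one
-- function per depth, each a literal transcription of the corresponding call)
def pvBuild3 (items : List pvQuad) : pvD3 :=
  items.foldl (fun d q => d.insert q.1.2.2.2 q.2) PySem.Dict.empty

def pvBuild2 (items : List pvQuad) : pvD2 :=
  let groups := items.foldl (fun g q => g.modify q.1.2.2.1 [] (fun l => l ++ [q])) PySem.Dict.empty
  PySem.Dict.mk (groups.items.map (fun q => (q.1, pvBuild3 q.2)))

def pvBuild1 (items : List pvQuad) : pvD1 :=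
  let groups := items.foldl (fun g q => g.modify q.1.2.1 [] (fun l => l ++ [q])) PySem.Dict.empty
  PySem.Dict.mk (groups.items.map (fun q => (q.1, pvBuild2 q.2)))

def pvBuild0 (items : List pvQuad) : pvD0 :=
  let groups := items.foldl (fun g q => g.modify q.1.1 [] (fun l => l ++ [q])) PySem.Dict.empty
  PySem.Dict.mk (groups.items.map (fun q => (q.1, pvBuild1 q.2)))

def create_hierarchical_structure_alt (input_dict : List (String × String)) : List (String × List (String × List (String × List (String × String)))) :=
  pvUnwrap (pvBuild0 (pvQuadsB input_dict))

-- ===== PRECONDITION & SPEC =====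
def Spec_create_hierarchical_structure (input_dict : List (String × String)) (out : List (String × List (String × List (String × List (String × String))))) : Prop := out = create_hierarchical_structure_alt input_dict
instance (input_dict : List (String × String)) (out : List (String × List (String × List (String × List (String × String))))) : Decidable (Spec_create_hierarchical_structure input_dict out) := by
  unfold Spec_create_hierarchical_structure
  letI i2 : DecidableEq (List (String × List (String × String))) := inferInstance
  letI i3 : DecidableEq (List (String × List (String × List (String × String)))) := inferInstance
  infer_instance

-- ===== CLAIM (what is proved, stated in full; the proofs are below) =====
def Claim_equal_create_hierarchical_structure : Prop := ∀ (input_dict : List (String × String)), Dom_create_hierarchical_structure input_dict → Spec_create_hierarchical_structure input_dict (create_hierarchical_structure input_dict)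

-- ===== LEMMAS AND PROOFS =====

-- parsing a single entry into a 4-part record, if it has one
def pvParse (kv : String × String) : Option pvQuad :=
  match PySem.Str.split? kv.1 "/" with
  | some [b, i, p, t] => some ((b, i, p, t), kv.2)
  | _ => none

-- A's per-record update, on parsed records
def pvStepQ (root : pvD0) (q : pvQuad) : pvD0 :=
  pvAssign root q.1.1 q.1.2.1 q.1.2.2.1 q.1.2.2.2 q.2

theorem pvQuadsB_eq_filterMap_aux (l : List (String × String)) :
    ∀ acc : List pvQuad,
      l.foldl (fun acc kv =>
        match PySem.Str.split? kv.1 "/" with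
        | some [b, i, p, t] => acc ++ [((b, i, p, t), kv.2)]
        | _ => acc) acc = acc ++ l.filterMap pvParse := by
  induction l with
  | nil => intro acc; simp
  | cons kv tl ih =>
    intro acc
    simp only [List.foldl_cons, List.filterMap_cons]
    rcases h : PySem.Str.split? kv.1 "/" with _ | ls
    · simp only [pvParse, h]; exact ih acc
    · rcases ls with _ | ⟨a, _ | ⟨b, _ | ⟨c, _ | ⟨d, _ | ⟨e, t⟩⟩⟩⟩⟩ <;>
        simp only [pvParse, h] <;> rw [ih] <;> simp <;> rfl

theorem pvQuadsB_eq_filterMap (l : List (String × String)) :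
    pvQuadsB l = l.filterMap pvParse := by
  simpa using pvQuadsB_eq_filterMap_aux l []

theorem pvFoldl_A_eq_quads (l : List (String × String)) :
    ∀ root : pvD0,
      l.foldl pvStepA root = (l.filterMap pvParse).foldl pvStepQ root := by
  induction l with
  | nil => intro root; rfl
  | cons kv tl ih =>
    intro root
    simp only [List.foldl_cons, List.filterMap_cons]
    rcases h : PySem.Str.split? kv.1 "/" with _ | ls
    · rw [show pvStepA root kv = root from by unfold pvStepA; rw [h]]
      simp only [pvParse, h]; exact ih _
    · rcases ls with _ | ⟨a, _ | ⟨b, _ | ⟨c, _ | ⟨d, _ | ⟨e, t⟩⟩⟩⟩⟩ <;>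
        simp only [pvParse, h] <;>
        first
          | (rw [show pvStepA root kv = root from by unfold pvStepA; rw [h]]; exact ih _)
          | (rw [show pvStepA root kv = pvAssign root a b c d kv.2 from by unfold pvStepA; rw [h]]
             simp only [List.foldl_cons]; exact ih _)

-- the "ensure levels then assign" chain equals one nested in-place update
theorem pvAssign_eq_modify (root : pvD0) (b i p t v : String) :
    pvAssign root b i p t v
      = root.modify b PySem.Dict.empty (fun d1 =>
          d1.modify i PySem.Dict.empty (fun d2 =>
            d2.modify p PySem.Dict.empty (fun d3 => d3.insert t v))) := by
  unfold pvAssign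
  by_cases hb : root.contains b = true
  · simp only [hb, if_true]
    by_cases hi : (root.getD b PySem.Dict.empty).contains i = true
    · simp only [hi, if_true]
      by_cases hp : ((root.getD b PySem.Dict.empty).getD i PySem.Dict.empty).contains p = true
      · simp [hp, PySem.Dict.modify]
      · have hp' : ((root.getD b PySem.Dict.empty).getD i PySem.Dict.empty).contains p = false := by
          simpa using hp
        simp [hp', PySem.Dict.modify, PySem.Dict.getD_insert_self, PySem.Dict.insert_insert_self,
          PySem.Dict.getD_of_not_contains]
    · have hi' : (root.getD b PySem.Dict.empty).contains i = false := by simpa using hi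
      simp [hi', PySem.Dict.modify, PySem.Dict.getD_insert_self, PySem.Dict.insert_insert_self,
        PySem.Dict.getD_of_not_contains, PySem.Dict.contains_empty]
  · have hb' : root.contains b = false := by simpa using hb
    simp [hb', PySem.Dict.modify, PySem.Dict.getD_insert_self, PySem.Dict.insert_insert_self,
      PySem.Dict.getD_of_not_contains, PySem.Dict.contains_empty]

-- generic: getD after a "modify along a key" loop
theorem pvGetD_foldl_modify {β V : Type} (key : β → String) (g : V → β → V) (e : V)
    (l : List β) :
    ∀ (d : PySem.Dict String V) (k : String),
      (l.foldl (fun d p => d.modify (key p) e (fun v => g v p)) d).getD k e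
        = (l.filter (fun p => key p == k)).foldl g (d.getD k e) := by
  induction l with
  | nil => intro d k; rfl
  | cons p tl ih =>
    intro d k
    simp only [List.foldl_cons, List.filter_cons]
    rw [ih]
    by_cases hk : key p = k
    · simp [hk]
    · simp [hk, PySem.Dict.getD_modify, Ne.symm hk]

-- generic: a "modify along a key" loop from the empty dict, characterised as the
-- first occurrences of the keys, each paired with the fold over that key's group
theorem pvFoldl_modify_char {β V : Type} (key : β → String) (g : V → β → V) (e : V)
    (l : List β) :
    l.foldl (fun d p => d.modify (key p) e (fun v => g v p)) PySem.Dict.empty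
      = PySem.Dict.mk ((PySem.Set.ofList (l.map key)).map
          (fun k => (k, (l.filter (fun p => key p == k)).foldl g e))) := by
  apply PySem.Dict.ext
  have hnd : (l.foldl (fun d p => d.modify (key p) e (fun v => g v p)) PySem.Dict.empty).keys.Nodup :=
    PySem.Dict.nodup_keys_foldl_modify_key l key e (fun _ p v => g v p) PySem.Dict.empty
      (by simp [PySem.Dict.keys_empty])
  rw [PySem.Dict.items_eq_map_keys _ hnd e]
  rw [PySem.Dict.keys_foldl_modify_key]
  simp only [PySem.Dict.keys_empty, PySem.Set.update_nil_left]
  simp only [pvGetD_foldl_modify key g e l, PySem.Dict.getD_empty]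

theorem pvFlatten_singleton {α : Type} (l : List α) :
    (l.map (fun x => [x])).flatten = l := by
  induction l with
  | nil => rfl
  | cons x tl ih => simp [ih]

theorem pvL2 (items : List pvQuad) :
    items.foldl (fun d2 q => d2.modify q.1.2.2.1 PySem.Dict.empty
        (fun d3 => d3.insert q.1.2.2.2 q.2)) PySem.Dict.empty
      = pvBuild2 items := by
  rw [pvFoldl_modify_char (fun q : pvQuad => q.1.2.2.1) (fun d3 q => d3.insert q.1.2.2.2 q.2) PySem.Dict.empty]
  unfold pvBuild2
  rw [pvFoldl_modify_char (fun q : pvQuad => q.1.2.2.1) (fun acc q => acc ++ [q]) ([] : List pvQuad)]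
  simp [List.map_map, Function.comp, pvFlatten_singleton, pvBuild3]

theorem pvL1 (items : List pvQuad) :
    items.foldl (fun d1 q => d1.modify q.1.2.1 PySem.Dict.empty
        (fun d2 => d2.modify q.1.2.2.1 PySem.Dict.empty
          (fun d3 => d3.insert q.1.2.2.2 q.2))) PySem.Dict.empty
      = pvBuild1 items := by
  rw [pvFoldl_modify_char (fun q : pvQuad => q.1.2.1)
    (fun d2 q => d2.modify q.1.2.2.1 PySem.Dict.empty (fun d3 => d3.insert q.1.2.2.2 q.2)) PySem.Dict.empty]
  unfold pvBuild1
  rw [pvFoldl_modify_char (fun q : pvQuad => q.1.2.1) (fun acc q => acc ++ [q]) ([] : List pvQuad)]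
  simp [List.map_map, Function.comp, pvFlatten_singleton, pvL2]

theorem pvL0 (items : List pvQuad) :
    items.foldl (fun d0 q => d0.modify q.1.1 PySem.Dict.empty
        (fun d1 => d1.modify q.1.2.1 PySem.Dict.empty
          (fun d2 => d2.modify q.1.2.2.1 PySem.Dict.empty
            (fun d3 => d3.insert q.1.2.2.2 q.2)))) PySem.Dict.empty
      = pvBuild0 items := by
  rw [pvFoldl_modify_char (fun q : pvQuad => q.1.1)
    (fun d1 q => d1.modify q.1.2.1 PySem.Dict.empty (fun d2 => d2.modify q.1.2.2.1 PySem.Dict.empty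
      (fun d3 => d3.insert q.1.2.2.2 q.2))) PySem.Dict.empty]
  unfold pvBuild0
  rw [pvFoldl_modify_char (fun q : pvQuad => q.1.1) (fun acc q => acc ++ [q]) ([] : List pvQuad)]
  simp [List.map_map, Function.comp, pvFlatten_singleton, pvL1]

-- ===== VERDICT (by name: the statement is the Claim_ definition above) =====
theorem create_hierarchical_structure_spec : Claim_equal_create_hierarchical_structure := by
  intro input_dict _
  unfold Spec_create_hierarchical_structure
  unfold create_hierarchical_structure create_hierarchical_structure_alt
  rw [pvFoldl_A_eq_quads, pvQuadsB_eq_filterMap]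
  have hstep : pvStepQ = fun (root : pvD0) (q : pvQuad) =>
      root.modify q.1.1 PySem.Dict.empty (fun d1 =>
        d1.modify q.1.2.1 PySem.Dict.empty (fun d2 =>
          d2.modify q.1.2.2.1 PySem.Dict.empty (fun d3 => d3.insert q.1.2.2.2 q.2))) := by
    funext root q
    exact pvAssign_eq_modify root q.1.1 q.1.2.1 q.1.2.2.1 q.1.2.2.2 q.2
  rw [hstep]
  exact congrArg pvUnwrap (pvL0 _)
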